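-- pv_equiv track=rewrite | github.com/pedroacamargo/University | Cybersecurity/DataSecurity/Guião2/ZIP/Question1/decipher.py | countDigraphs
-- ===== SOURCE A (Python) =====
-- def countDigraphs(phrase):
--     digraphs = {}
--     for i in range(len(phrase) - 1):
--         digraph = phrase[i:i + 2]
--         if digraph not in digraphs:
--             digraphs[digraph] = 0
--         digraphs[digraph] += 1
--     return digraphs
-- ===== SOURCE B (Python) =====
-- def countDigraphs(phrase):
--     grams = [phrase[i:i + 2] for i in range(len(phrase) - 1)]
--     return {g: grams.count(g) for g in dict.fromkeys(grams)}
-- ===== Notes on version B (the rewrite author's own statement) =====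
-- stated objective: alternative
-- what changed: B materialises the list of adjacent digraphs once, deduplicates it in first-appearance order (dict.fromkeys), and builds the result by counting each distinct digraph in that list, instead of A's single pass that hash-increments a dict entry per position.
import Mathlib
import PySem

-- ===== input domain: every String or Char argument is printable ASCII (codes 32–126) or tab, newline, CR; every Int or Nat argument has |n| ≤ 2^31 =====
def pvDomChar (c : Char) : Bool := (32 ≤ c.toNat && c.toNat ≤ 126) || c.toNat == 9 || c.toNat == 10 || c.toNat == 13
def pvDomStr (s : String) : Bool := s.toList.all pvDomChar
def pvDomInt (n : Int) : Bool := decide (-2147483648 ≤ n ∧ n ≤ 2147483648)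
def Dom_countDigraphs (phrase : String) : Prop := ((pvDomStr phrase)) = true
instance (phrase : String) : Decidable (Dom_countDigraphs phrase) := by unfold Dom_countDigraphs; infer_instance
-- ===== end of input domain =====

-- B replaces A's one-pass dict-increment loop by: build the digraph list once, dedup it in
-- first-appearance order, and count each distinct digraph in that list (alternative decomposition).

-- ===== PORT A =====
def countDigraphs (phrase : String) : List (String × Int) :=
  ((PySem.List.pyRange 0 ((PySem.Str.len phrase : Int) - 1) 1).foldl
    (fun digraphs i =>
      let digraph := PySem.Str.slice phrase (some i) (some (i + 2))
      let digraphs :=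
        if digraphs.contains digraph = false then digraphs.insert digraph 0 else digraphs
      digraphs.modify digraph 0 (· + 1))
    PySem.Dict.empty).items

-- ===== PORT B =====
def countDigraphs_alt (phrase : String) : List (String × Int) :=
  let grams := (PySem.List.pyRange 0 ((PySem.Str.len phrase : Int) - 1) 1).map
      (fun i => PySem.Str.slice phrase (some i) (some (i + 2)))
  (PySem.List.dedup grams).map (fun g => (g, (grams.count g : Int)))

-- ===== PRECONDITION & SPEC =====
def Spec_countDigraphs (phrase : String) (out : List (String × Int)) : Prop := out = countDigraphs_alt phrase
instance (phrase : String) (out : List (String × Int)) : Decidable (Spec_countDigraphs phrase out) := by unfold Spec_countDigraphs; infer_instance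

-- ===== CLAIM (what is proved, stated in full; the proofs are below) =====
def Claim_equal_countDigraphs : Prop := ∀ (phrase : String), Dom_countDigraphs phrase → Spec_countDigraphs phrase (countDigraphs phrase)

-- ===== LEMMAS AND PROOFS =====

-- A's loop body ('insert 0 when missing, then += 1') is exactly the Counter step.
theorem countDigraphs_step (d : PySem.Dict String Int) (g : String) :
    ((if d.contains g = false then d.insert g 0 else d).modify g 0 (· + 1))
      = d.modify g 0 (· + 1) := by
  by_cases h : d.contains g = false
  · simp only [h, if_true, PySem.Dict.modify, PySem.Dict.getD_insert_self,
      PySem.Dict.getD_of_not_contains d 0 h, zero_add]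
    apply PySem.Dict.ext
    rw [PySem.Dict.items_insert_of_contains _ _ (PySem.Dict.contains_insert_self d g 0),
      PySem.Dict.items_insert_of_not_contains _ _ h,
      PySem.Dict.items_insert_of_not_contains _ _ h,
      List.map_append]
    congr 1
    · conv_rhs => rw [← List.map_id d.items]
      apply List.map_congr_left
      intro p hp
      have hk : (p.1 == g) = false := by
        by_contra hne
        have hg : p.1 = g := by
          cases hb : (p.1 == g) <;> simp_all
        have hc : d.contains g = true := by
          rw [PySem.Dict.contains_iff_mem_keys]
          exact hg ▸ (by simpa [PySem.Dict.keys] using ⟨p.2, by simpa using hp⟩)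
        simp [hc] at h
      simp [hk]
    · simp
  · simp [h]

-- A's whole loop, run over any index list, builds Counter of the mapped digraphs.
theorem countDigraphs_fold (f : Int → String) (l : List Int) (d : PySem.Dict String Int) :
    (l.foldl
      (fun digraphs i =>
        let digraph := f i
        let digraphs :=
          if digraphs.contains digraph = false then digraphs.insert digraph 0 else digraphs
        digraphs.modify digraph 0 (· + 1))
      d) = (l.map f).foldl (fun d x => d.modify x 0 (· + 1)) d := by
  induction l generalizing d with
  | nil => rfl
  | cons x xs ih =>
    simp only [List.foldl_cons, List.map_cons]
    rw [countDigraphs_step, ih]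

-- ===== VERDICT (by name: the statement is the Claim_ definition above) =====
theorem countDigraphs_spec : Claim_equal_countDigraphs := by
  intro phrase _
  unfold Spec_countDigraphs countDigraphs countDigraphs_alt
  rw [countDigraphs_fold]
  have : ((PySem.List.pyRange 0 ((PySem.Str.len phrase : Int) - 1) 1).map
        (fun i => PySem.Str.slice phrase (some i) (some (i + 2)))).foldl
        (fun d x => d.modify x 0 (· + 1)) PySem.Dict.empty
      = PySem.Dict.counter ((PySem.List.pyRange 0 ((PySem.Str.len phrase : Int) - 1) 1).map
        (fun i => PySem.Str.slice phrase (some i) (some (i + 2)))) := rfl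
  rw [this, PySem.Dict.items_counter]
  simp only [PySem.List.dedup_eq_ofList]
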